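-- pv_equiv track=rewrite | github.com/varunjain3/BioProject | g4hunter/final.py | numg_calc
-- ===== SOURCE A (Python) =====
-- def numg_calc(seq):
--     numg = None
--     score = []
--     i = 0
--
--     while i < len(seq):
--         if  seq[i] == "G":
--             t = 0
--             while(seq[t+i]) == "G":
--                 t += 1
--
--                 if t+i>=len(seq):
--                     break
--
--             score += [t]
--             i += t
--         else:
--             score += [0]
--             i += 1
--
--     main_score = score
--
--     for i in range(4,0,-1):
--         count = 0
--         for j in score:
--             if j == i:
--                 count += 1
--         if count >= 4:
--             numg = i
--             break
--         else:
--             temp = []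
--             j = 0
--             for j in range(len(main_score)):
--                 if main_score[j] >= i and i> 1:
--                     temp += [i-1]*(main_score[j]//(i-1))
--
--                 else:
--                     temp += [main_score[j]]
--
--             score = temp
--
--     if numg is None:
--         return 0
--     else:
--         return numg
-- ===== SOURCE B (Python) =====
-- def numg_calc(seq):
--     # One pass: accumulate the four threshold counters directly from maximal G-run lengths.
--     c4 = c3 = c2 = c1 = 0
--     run = 0
--
--     def flush(x):
--         nonlocal c4, c3, c2, c1
--         c4 += 1 if x == 4 else 0
--         c3 += x // 3 if x >= 4 else (1 if x == 3 else 0)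
--         c2 += x // 2 if x >= 3 else (1 if x == 2 else 0)
--         c1 += x if x >= 2 else (1 if x == 1 else 0)
--
--     for ch in seq:
--         if ch == "G":
--             run += 1
--         else:
--             if run:
--                 flush(run)
--             run = 0
--     if run:
--         flush(run)
--
--     if c4 >= 4:
--         return 4
--     if c3 >= 4:
--         return 3
--     if c2 >= 4:
--         return 2
--     if c1 >= 4:
--         return 1
--     return 0
-- ===== Notes on version B (the rewrite author's own statement) =====
-- stated objective: faster
-- what changed: B replaces A's per-threshold full rebuild of the score list (temp lists of replicated entries, then a counting pass over each) by a single pass over the sequence that accumulates all four threshold counters directly from each maximal G-run length with closed-form contributions.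
import Mathlib
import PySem

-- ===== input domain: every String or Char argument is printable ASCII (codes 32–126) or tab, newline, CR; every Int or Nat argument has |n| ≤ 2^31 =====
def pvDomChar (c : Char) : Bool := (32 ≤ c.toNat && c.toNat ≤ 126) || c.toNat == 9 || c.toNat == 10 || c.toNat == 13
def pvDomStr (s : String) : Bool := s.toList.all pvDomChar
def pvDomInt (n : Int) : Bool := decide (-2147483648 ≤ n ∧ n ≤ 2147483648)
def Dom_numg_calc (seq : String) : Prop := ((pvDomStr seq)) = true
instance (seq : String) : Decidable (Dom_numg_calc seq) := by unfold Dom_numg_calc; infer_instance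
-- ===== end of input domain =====

-- B replaces A's repeated full-list rebuild passes by one pass over the G-runs that
-- accumulates the four threshold counters with closed forms (objective: faster, constant-factor).

-- ===== PORT A =====

-- inner 'while seq[t+i] == "G"' loop: counts the leading G's of the remaining suffix
def pvGRun : List Char → Nat
  | [] => 0
  | c :: rest => if c = 'G' then pvGRun rest + 1 else 0

-- outer phase-1 'while i < len(seq)' loop: one entry t per maximal G-run, 0 per other char
def pvScoreA : List Char → List Int
  | [] => []
  | c :: rest =>
    if c = 'G' then
      ((pvGRun rest + 1 : Nat) : Int) :: pvScoreA (rest.drop (pvGRun rest))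
    else
      0 :: pvScoreA rest
termination_by l => l.length
decreasing_by all_goals simp

-- 'for j in score: if j == i: count += 1'
def pvCountA (score : List Int) (i : Int) : Int :=
  score.foldl (fun count j => if j = i then count + 1 else count) 0

-- 'for j in range(len(main_score)): if … : temp += [i-1]*(…) else: temp += [main_score[j]]'
def pvTransformA (main : List Int) (i : Int) : List Int :=
  main.foldl (fun temp x =>
    temp ++ (if x ≥ i ∧ i > 1 then List.replicate (PySem.Int.floordiv x (i - 1)).toNat (i - 1)
             else [x])) []

-- 'for i in range(4,0,-1): …' with the break; falling off the loop leaves numg = None → 0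
def pvPhase2 (main : List Int) : List Int → List Int → Int
  | _, [] => 0
  | score, i :: is =>
    if pvCountA score i ≥ 4 then i else pvPhase2 main (pvTransformA main i) is

def numg_calc (seq : String) : Int :=
  let score := pvScoreA seq.toList
  pvPhase2 score score [4, 3, 2, 1]

-- ===== PORT B =====

-- the four closed-form per-run contributions of flush(x)
def pvF4 (x : Int) : Int := if x = 4 then 1 else 0
def pvF3 (x : Int) : Int := if x ≥ 4 then PySem.Int.floordiv x 3 else if x = 3 then 1 else 0
def pvF2 (x : Int) : Int := if x ≥ 3 then PySem.Int.floordiv x 2 else if x = 2 then 1 else 0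
def pvF1 (x : Int) : Int := if x ≥ 2 then x else if x = 1 then 1 else 0

def pvFlush (st : Int × Int × Int × Int) (x : Int) : Int × Int × Int × Int :=
  (st.1 + pvF4 x, st.2.1 + pvF3 x, st.2.2.1 + pvF2 x, st.2.2.2 + pvF1 x)

-- 'for ch in seq' loop tracking the current run, flushing at each run end
def pvScanB : List Char → Int → (Int × Int × Int × Int) → (Int × Int × Int × Int)
  | [], run, st => if run ≠ 0 then pvFlush st run else st
  | c :: rest, run, st =>
    if c = 'G' then pvScanB rest (run + 1) st
    else pvScanB rest 0 (if run ≠ 0 then pvFlush st run else st)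

def numg_calc_alt (seq : String) : Int :=
  let st := pvScanB seq.toList 0 (0, 0, 0, 0)
  if st.1 ≥ 4 then 4
  else if st.2.1 ≥ 4 then 3
  else if st.2.2.1 ≥ 4 then 2
  else if st.2.2.2 ≥ 4 then 1
  else 0

-- ===== PRECONDITION & SPEC =====
def Spec_numg_calc (seq : String) (out : Int) : Prop := out = numg_calc_alt seq
instance (seq : String) (out : Int) : Decidable (Spec_numg_calc seq out) := by unfold Spec_numg_calc; infer_instance

-- ===== CLAIM (what is proved, stated in full; the proofs are below) =====
def Claim_equal_numg_calc : Prop := ∀ (seq : String), Dom_numg_calc seq → Spec_numg_calc seq (numg_calc seq)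

-- ===== LEMMAS AND PROOFS =====

theorem pvFlush_zero (st : Int × Int × Int × Int) : pvFlush st 0 = st := by
  obtain ⟨a, b, c, d⟩ := st
  simp [pvFlush, pvF4, pvF3, pvF2, pvF1]

theorem pvFlush_foldl (xs : List Int) (st : Int × Int × Int × Int) :
    xs.foldl pvFlush st =
      (st.1 + (xs.map pvF4).sum, st.2.1 + (xs.map pvF3).sum,
       st.2.2.1 + (xs.map pvF2).sum, st.2.2.2 + (xs.map pvF1).sum) := by
  induction xs generalizing st with
  | nil => simp
  | cons x xs ih =>
    obtain ⟨a, b, c, d⟩ := st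
    simp [List.foldl_cons, ih, pvFlush]
    refine ⟨by ring, by ring, by ring, by ring⟩

theorem pvGRun_replicate_append (r : Nat) (l : List Char) :
    pvGRun (List.replicate r 'G' ++ l) = r + pvGRun l := by
  induction r with
  | zero => simp
  | succ r ih => simp [List.replicate_succ, pvGRun, ih]; omega

theorem pvScoreA_replicate (r : Nat) :
    pvScoreA (List.replicate r 'G') = if r = 0 then [] else [(r : Int)] := by
  cases r with
  | zero => simp [pvScoreA]
  | succ r =>
    rw [List.replicate_succ]
    rw [pvScoreA]
    have h1 : pvGRun (List.replicate r 'G') = r := by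
      simpa using pvGRun_replicate_append r []
    simp [h1, pvScoreA]

theorem pvGRun_cons_ne (c : Char) (l : List Char) (hc : ¬ c = 'G') :
    pvGRun (c :: l) = 0 := by simp [pvGRun, hc]

theorem pvScoreA_run (r : Nat) (c : Char) (l : List Char) (hc : ¬ c = 'G') :
    pvScoreA (List.replicate r 'G' ++ c :: l) =
      (if r = 0 then [] else [(r : Int)]) ++ 0 :: pvScoreA l := by
  cases r with
  | zero => simp [pvScoreA, hc]
  | succ r =>
    rw [List.replicate_succ, List.cons_append, pvScoreA]
    have h1 : pvGRun (List.replicate r 'G' ++ c :: l) = r := by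
      simp [pvGRun_replicate_append, pvGRun_cons_ne c l hc]
    have h2 : (List.replicate r 'G' ++ c :: l).drop r = c :: l := by
      simp
    simp [h1, h2, pvScoreA, hc]

theorem pvScanB_eq (l : List Char) (r : Nat) (st : Int × Int × Int × Int) :
    pvScanB l (r : Int) st = (pvScoreA (List.replicate r 'G' ++ l)).foldl pvFlush st := by
  induction l generalizing r st with
  | nil =>
    rw [pvScanB]
    simp only [List.append_nil, pvScoreA_replicate]
    by_cases hr : r = 0
    · simp [hr]
    · simp [hr]
  | cons c rest ih =>
    rw [pvScanB]
    by_cases hc : c = 'G'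
    · subst hc
      have : List.replicate r 'G' ++ 'G' :: rest = List.replicate (r + 1) 'G' ++ rest := by
        rw [List.replicate_succ' (n := r)]
        simp
      rw [this]
      have := ih (r + 1) st
      push_cast at this
      simpa using this
    · rw [pvScoreA_run r c rest hc, if_neg (by simp [hc])]
      have ih0 := ih 0 (if (r : Int) ≠ 0 then pvFlush st (r : Int) else st)
      push_cast at ih0
      simp only [List.nil_append] at ih0
      rw [ih0, List.foldl_append]
      by_cases hr : r = 0
      · simp [hr, pvFlush_zero]
      · have hri : ((r : Int) ≠ 0) := by exact_mod_cast hr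
        simp [hr, pvFlush_zero]

theorem pvCountA_eq_countP (xs : List Int) (i : Int) :
    pvCountA xs i = ((xs.countP (fun x => decide (x = i))) : Int) := by
  unfold pvCountA
  rw [PySem.List.foldl_ite_add_one (p := fun x => x = i)]
  simp

theorem pvCountA_append (xs ys : List Int) (i : Int) :
    pvCountA (xs ++ ys) i = pvCountA xs i + pvCountA ys i := by
  simp [pvCountA_eq_countP, List.countP_append]

theorem pvCountA_replicate (n : Nat) (v i : Int) (h : v = i) :
    pvCountA (List.replicate n v) i = (n : Int) := by
  simp [pvCountA_eq_countP, h, List.countP_eq_length_filter]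

theorem pvTransformA_eq_flatMap (main : List Int) (i : Int) :
    pvTransformA main i = main.flatMap (fun x =>
      if x ≥ i ∧ i > 1 then List.replicate (PySem.Int.floordiv x (i - 1)).toNat (i - 1)
      else [x]) := by
  unfold pvTransformA
  rw [PySem.List.foldl_append_eq_flatMap]
  simp

theorem pvCountA_flatMap (g : Int → List Int) (main : List Int) (i : Int) :
    pvCountA (main.flatMap g) i = (main.map (fun x => pvCountA (g x) i)).sum := by
  induction main with
  | nil => simp [pvCountA]
  | cons x xs ih => simp [List.flatMap_cons, pvCountA_append, ih]

theorem floordiv_pos_nonneg (x d : Int) (hx : 0 < x) (hd : 0 < d) :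
    0 ≤ PySem.Int.floordiv x d := by
  rw [PySem.Int.floordiv_eq_ediv_of_pos hd]
  exact Int.ediv_nonneg (le_of_lt hx) (le_of_lt hd)

theorem count_transform (main : List Int) (i : Int) (hi : 1 < i) (hle : i ≤ 4) :
    pvCountA (pvTransformA main i) (i - 1) =
      (main.map (fun x => if x ≥ i then PySem.Int.floordiv x (i - 1)
                          else if x = i - 1 then 1 else 0)).sum := by
  rw [pvTransformA_eq_flatMap, pvCountA_flatMap]
  congr 1
  apply List.map_congr_left
  intro x _
  by_cases hx : x ≥ i
  · have hpos : (0:Int) < i - 1 := by omega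
    rw [if_pos ⟨hx, hi⟩, if_pos hx]
    rw [pvCountA_replicate _ _ _ rfl]
    have : 0 ≤ PySem.Int.floordiv x (i - 1) :=
      floordiv_pos_nonneg x (i - 1) (by omega) hpos
    omega
  · rw [if_neg (by tauto), if_neg hx]
    by_cases he : x = i - 1 <;>
      simp [pvCountA_eq_countP, he]

theorem count4_eq (main : List Int) :
    pvCountA main 4 = (main.map pvF4).sum := by
  induction main with
  | nil => simp [pvCountA]
  | cons x xs ih =>
    have : pvCountA (x :: xs) 4 = pvCountA [x] 4 + pvCountA xs 4 :=
      pvCountA_append [x] xs 4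
    rw [this, ih]
    by_cases hx : x = 4 <;> simp [pvCountA, pvF4, hx]

theorem count3_eq (main : List Int) :
    pvCountA (pvTransformA main 4) 3 = (main.map pvF3).sum := by
  have := count_transform main 4 (by norm_num) (by norm_num)
  norm_num at this
  rw [this]
  congr 1
  apply List.map_congr_left
  intro x _
  simp [pvF3]

theorem count2_eq (main : List Int) :
    pvCountA (pvTransformA main 3) 2 = (main.map pvF2).sum := by
  have := count_transform main 3 (by norm_num) (by norm_num)
  norm_num at this
  rw [this]
  congr 1
  apply List.map_congr_left
  intro x _
  simp [pvF2]

theorem count1_eq (main : List Int) :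
    pvCountA (pvTransformA main 2) 1 = (main.map pvF1).sum := by
  have := count_transform main 2 (by norm_num) (by norm_num)
  norm_num at this
  rw [this]
  congr 1

-- ===== VERDICT (by name: the statement is the Claim_ definition above) =====
theorem numg_calc_spec : Claim_equal_numg_calc := by
  intro seq _
  unfold Spec_numg_calc numg_calc numg_calc_alt
  have hscan : pvScanB seq.toList (0 : Int) (0, 0, 0, 0) =
      (pvScoreA seq.toList).foldl pvFlush (0, 0, 0, 0) := by
    simpa using pvScanB_eq seq.toList 0 (0, 0, 0, 0)
  rw [hscan, pvFlush_foldl]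
  set main := pvScoreA seq.toList with hm
  simp only [pvPhase2, count4_eq main, count3_eq main, count2_eq main, count1_eq main]
  simp only [zero_add]
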